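-- pv_equiv track=rewrite | github.com/sodabeans/Algorithm | Programmers/Level 1 Exhaustive Search 42840.py | solution
-- ===== SOURCE A (Python) =====
-- def solution(answers):
--     answer = []
--     one = [1, 2, 3, 4, 5]
--     two = [2, 1, 2, 3, 2, 4, 2, 5]
--     three = [3, 3, 1, 1, 2, 2, 4, 4, 5, 5]
--     ans_one = 0
--     ans_two = 0
--     ans_three = 0
--     ans_list = []
--
--     for i in range(len(answers)):
--         if (answers[i] == one[i % 5]):
--             ans_one = ans_one + 1
--         if (answers[i] == two[i % 8]):
--             ans_two = ans_two + 1
--         if (answers[i] == three[i % 10]):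
--             ans_three = ans_three + 1
--
--     ans_list.append(ans_one)
--     ans_list.append(ans_two)
--     ans_list.append(ans_three)
--
--     max_ans = max(ans_list)
--
--     if max_ans == ans_one:
--         answer.append(1)
--     if max_ans == ans_two:
--         answer.append(2)
--     if max_ans == ans_three:
--         answer.append(3)
--
--     return answer
-- ===== SOURCE B (Python) =====
-- def solution(answers):
--     # 40 = lcm(5, 8, 10): each pattern's value at index i depends only on i % 40.
--     # Build a histogram keyed by (i % 40, answer) in one pass, then score each
--     # pattern with 40 histogram lookups instead of comparing every answer.
--     keys = [(i % 40, a) for i, a in enumerate(answers)]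
--     counts = {}
--     for k in keys:
--         counts[k] = counts.get(k, 0) + 1
--     patterns = [[1, 2, 3, 4, 5],
--                 [2, 1, 2, 3, 2, 4, 2, 5],
--                 [3, 3, 1, 1, 2, 2, 4, 4, 5, 5]]
--     scores = [sum(counts.get((r, pat[r % len(pat)]), 0) for r in range(40))
--               for pat in patterns]
--     best = max(scores)
--     return [i + 1 for i, s in enumerate(scores) if s == best]
-- ===== Notes on version B (the rewrite author's own statement) =====
-- stated objective: alternative
-- what changed: Instead of comparing each answer against the cyclic patterns, B builds a histogram keyed by (index mod 40, answer) in one pass (40 = lcm of the cycle lengths) and computes each pattern's score by 40 histogram lookups, then selects the argmax indices.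
import Mathlib
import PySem

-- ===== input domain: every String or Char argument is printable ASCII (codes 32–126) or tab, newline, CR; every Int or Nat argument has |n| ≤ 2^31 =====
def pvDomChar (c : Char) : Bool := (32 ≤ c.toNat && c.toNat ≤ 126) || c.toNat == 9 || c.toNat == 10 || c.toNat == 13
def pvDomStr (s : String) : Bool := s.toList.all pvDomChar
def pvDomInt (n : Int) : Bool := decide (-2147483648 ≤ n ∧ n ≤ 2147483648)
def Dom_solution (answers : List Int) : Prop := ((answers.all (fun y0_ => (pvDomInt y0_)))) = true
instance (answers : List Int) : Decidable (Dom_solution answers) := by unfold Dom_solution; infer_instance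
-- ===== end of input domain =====

-- B replaces A's per-element comparison against the three cyclic patterns by a histogram
-- keyed by (index mod 40, answer) — 40 = lcm(5,8,10) — scored with 40 lookups per pattern.

-- ===== PORT A =====
-- one step of A's for-loop body at index i (state = the three counters)
def solutionBody (answers : List Int) (st : Int × Int × Int) (i : Int) : Int × Int × Int :=
  let a := PySem.List.pyGetD answers i 0
  let s1 := if a = PySem.List.pyGetD ([1, 2, 3, 4, 5] : List Int) (PySem.Int.mod i 5) 0 then st.1 + 1 else st.1
  let s2 := if a = PySem.List.pyGetD ([2, 1, 2, 3, 2, 4, 2, 5] : List Int) (PySem.Int.mod i 8) 0 then st.2.1 + 1 else st.2.1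
  let s3 := if a = PySem.List.pyGetD ([3, 3, 1, 1, 2, 2, 4, 4, 5, 5] : List Int) (PySem.Int.mod i 10) 0 then st.2.2 + 1 else st.2.2
  (s1, s2, s3)

def solution (answers : List Int) : List Int :=
  let s := (PySem.List.pyRange 0 (answers.length : Int) 1).foldl (solutionBody answers) (0, 0, 0)
  let ansList : List Int := [s.1, s.2.1, s.2.2]
  let maxAns := (PySem.List.max? ansList (fun y => y)).getD 0
  ((if maxAns = s.1 then [(1 : Int)] else []) ++ (if maxAns = s.2.1 then [2] else [])) ++
    (if maxAns = s.2.2 then [3] else [])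

-- ===== PORT B =====
-- keys = [(i % 40, a) for i, a in enumerate(answers)]
def altKeys (answers : List Int) : List (Int × Int) :=
  (PySem.List.enumerate answers 0).map (fun p => (PySem.Int.mod p.1 40, p.2))

-- sum(counts.get((r, pat[r % len(pat)]), 0) for r in range(40))
def altScore (counts : PySem.Dict (Int × Int) Int) (pat : List Int) : Int :=
  ((PySem.List.pyRange 0 40 1).map
    (fun r => counts.getD (r, PySem.List.pyGetD pat (PySem.Int.mod r (pat.length : Int)) 0) 0)).sum

def solution_alt (answers : List Int) : List Int :=
  let counts := (altKeys answers).foldl (fun d k => d.insert k (d.getD k 0 + 1)) PySem.Dict.empty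
  let patterns : List (List Int) :=
    [[1, 2, 3, 4, 5], [2, 1, 2, 3, 2, 4, 2, 5], [3, 3, 1, 1, 2, 2, 4, 4, 5, 5]]
  let scores := patterns.map (altScore counts)
  let best := (PySem.List.max? scores (fun y => y)).getD 0
  ((PySem.List.enumerate scores 0).filter (fun p => p.2 == best)).map (fun p => p.1 + 1)

-- ===== PRECONDITION & SPEC =====
def Spec_solution (answers : List Int) (out : List Int) : Prop := out = solution_alt answers
instance (answers : List Int) (out : List Int) : Decidable (Spec_solution answers out) := by unfold Spec_solution; infer_instance

-- ===== CLAIM (what is proved, stated in full; the proofs are below) =====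
def Claim_equal_solution : Prop := ∀ (answers : List Int), Dom_solution answers → Spec_solution answers (solution answers)

-- ===== LEMMAS AND PROOFS =====

-- proof-side characterisation: number of matches of answers against the cyclic pattern pat
def scoreOf (pat : List Int) (answers : List Int) : Int :=
  ((PySem.List.enumerate answers 0).map
    (fun p => if p.2 = PySem.List.pyGetD pat (PySem.Int.mod p.1 (pat.length : Int)) 0 then (1 : Int) else 0)).sum

theorem pyGetD_append_lt (ys : List Int) (x : Int) (i : Int) (h0 : 0 ≤ i)
    (h : i < ys.length) :
    PySem.List.pyGetD (ys ++ [x]) i 0 = PySem.List.pyGetD ys i 0 := by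
  rw [PySem.List.pyGetD_eq_getElem _ _ h0 (by simp; omega),
    PySem.List.pyGetD_eq_getElem _ _ h0 (by omega)]
  rw [List.getElem_append_left]

theorem scoreOf_append (pat ys : List Int) (x : Int) :
    scoreOf pat (ys ++ [x]) =
      scoreOf pat ys +
        (if x = PySem.List.pyGetD pat (PySem.Int.mod (ys.length : Int) (pat.length : Int)) 0
          then 1 else 0) := by
  unfold scoreOf
  rw [PySem.List.enumerate_append]
  simp [PySem.List.enumerate_cons, PySem.List.enumerate_nil]

theorem fold_eq_scores (answers : List Int) :
    (PySem.List.pyRange 0 (answers.length : Int) 1).foldl (solutionBody answers) (0, 0, 0) =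
      (scoreOf [1, 2, 3, 4, 5] answers,
       scoreOf [2, 1, 2, 3, 2, 4, 2, 5] answers,
       scoreOf [3, 3, 1, 1, 2, 2, 4, 4, 5, 5] answers) := by
  induction answers using List.reverseRecOn with
  | nil =>
    simp [PySem.List.pyRange_one_eq_nil (le_refl 0), scoreOf, PySem.List.enumerate_nil]
  | append_singleton ys x ih =>
    have hlen : (((ys ++ [x]).length : Nat) : Int) = (ys.length : Int) + 1 := by
      simp
    rw [hlen, PySem.List.pyRange_one_succ_right (by positivity), List.foldl_append]
    have hbody : (PySem.List.pyRange 0 (ys.length : Int) 1).foldl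
        (solutionBody (ys ++ [x])) ((0 : Int), (0 : Int), (0 : Int)) =
        (PySem.List.pyRange 0 (ys.length : Int) 1).foldl (solutionBody ys) (0, 0, 0) := by
      apply PySem.List.foldl_congr_mem
      intro acc i hi
      rw [PySem.List.mem_pyRange_one] at hi
      unfold solutionBody
      rw [pyGetD_append_lt ys x i hi.1 hi.2]
    rw [hbody, ih]
    simp only [List.foldl_cons, List.foldl_nil]
    unfold solutionBody
    rw [PySem.List.pyGetD_natCast]
    have hx : (ys ++ [x]).getD ys.length 0 = x := by simp
    rw [hx, scoreOf_append, scoreOf_append, scoreOf_append]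
    simp only [Prod.mk.injEq]
    norm_num
    split_ifs <;> simp

-- a sum of point indicators over a duplicate-free index list collapses to one indicator
theorem sum_indicator (g : Int → Int) (q x : Int) (rs : List Int) (hnd : rs.Nodup) :
    (rs.map (fun r => if ((q, x) : Int × Int) = (r, g r) then (1 : Int) else 0)).sum =
      if q ∈ rs ∧ x = g q then 1 else 0 := by
  induction rs with
  | nil => simp
  | cons r rs ih =>
    rcases List.nodup_cons.mp hnd with ⟨hr, hnd'⟩
    rw [List.map_cons, List.sum_cons, ih hnd']
    by_cases hq : q = r
    · subst hq
      have hnot : ¬ (q ∈ rs ∧ x = g q) := fun h => hr h.1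
      simp [hnot, Prod.ext_iff]
    · have h1 : ¬ ((q, x) : Int × Int) = (r, g r) := by
        simp [Prod.ext_iff]; intro h; exact absurd h hq
      simp only [h1, if_false, zero_add]
      simp [List.mem_cons, hq]

-- histogram score = match count, for any pattern whose length divides 40
theorem histScore_eq (pat : List Int) (hdvd : pat.length ∣ 40) (answers : List Int) :
    ((PySem.List.pyRange 0 40 1).map
      (fun r => ((altKeys answers).count
        ((r, PySem.List.pyGetD pat (PySem.Int.mod r (pat.length : Int)) 0) : Int × Int) : Int))).sum =
      scoreOf pat answers := by
  induction answers using List.reverseRecOn with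
  | nil => simp [altKeys, PySem.List.enumerate_nil, scoreOf]
  | append_singleton ys x ih =>
    have hkeys : altKeys (ys ++ [x]) =
        altKeys ys ++ [((PySem.Int.mod (ys.length : Int) 40, x) : Int × Int)] := by
      unfold altKeys
      rw [PySem.List.enumerate_append]
      simp
    rw [hkeys, scoreOf_append, ← ih]
    have hcount : ∀ r : Int,
        ((altKeys ys ++ [((PySem.Int.mod (ys.length : Int) 40, x) : Int × Int)]).count
            ((r, PySem.List.pyGetD pat (PySem.Int.mod r (pat.length : Int)) 0) : Int × Int) : Int)
          = ((altKeys ys).count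
              ((r, PySem.List.pyGetD pat (PySem.Int.mod r (pat.length : Int)) 0) : Int × Int) : Int)
            + (if ((PySem.Int.mod (ys.length : Int) 40, x) : Int × Int)
                 = (r, PySem.List.pyGetD pat (PySem.Int.mod r (pat.length : Int)) 0) then 1 else 0) := by
      intro r
      rw [List.count_append, List.count_singleton]
      split_ifs with h1 h2 h2
      · push_cast; ring
      · exact absurd (beq_iff_eq.mp h1) h2
      · exact absurd (beq_iff_eq.mpr h2) (by simpa using h1)
      · push_cast; ring
    simp only [hcount]
    rw [PySem.List.sum_map_add_int]
    congr 1
    rw [sum_indicator _ _ _ _ (PySem.List.nodup_pyRange_one 0 40)]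
    have hq : PySem.Int.mod ((ys.length : Nat) : Int) 40 = (((ys.length % 40 : Nat) : Nat) : Int) := by
      exact_mod_cast PySem.Int.mod_natCast ys.length 40
    have hmem : ((ys.length % 40 : Nat) : Int) ∈ PySem.List.pyRange 0 40 1 := by
      rw [PySem.List.mem_pyRange_one]
      constructor
      · exact Int.natCast_nonneg _
      · exact_mod_cast Nat.mod_lt _ (by norm_num)
    have hval : PySem.List.pyGetD pat (PySem.Int.mod ((ys.length % 40 : Nat) : Int) (pat.length : Int)) 0
        = PySem.List.pyGetD pat (PySem.Int.mod ((ys.length : Nat) : Int) (pat.length : Int)) 0 := by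
      rw [PySem.Int.mod_natCast, PySem.Int.mod_natCast, Nat.mod_mod_of_dvd _ hdvd]
    rw [hq, hval]
    exact if_congr (and_iff_right hmem) rfl rfl

-- B's score of a pattern over the built histogram equals the match count
theorem altScore_eq (answers : List Int) (pat : List Int) (hdvd : pat.length ∣ 40) :
    altScore ((altKeys answers).foldl (fun d k => d.insert k (d.getD k 0 + 1)) PySem.Dict.empty) pat
      = scoreOf pat answers := by
  unfold altScore
  simp only [PySem.Dict.getD_foldl_insert_add_one, PySem.Dict.getD_empty, zero_add]
  exact histScore_eq pat hdvd answers

-- maxAns selection: A's append-chain equals B's enumerate-filter-map on the three scores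
theorem pick (m a b c : Int) :
    (((if m = a then [(1 : Int)] else []) ++ if m = b then [2] else []) ++ if m = c then [3] else []) =
      List.map (fun p : Int × Int => p.1 + 1)
        (List.filter (fun p : Int × Int => p.2 == m) [(0, a), (0 + 1, b), (0 + 1 + 1, c)]) := by
  have key : ∀ x : Int, (x == m) = decide (m = x) := by
    intro x
    rcases eq_or_ne m x with h | h
    · simp [h]
    · simp [h, Ne.symm h]
  simp only [List.filter_cons, List.filter_nil, key, decide_eq_true_eq]
  split_ifs <;> simp

-- ===== VERDICT (by name: the statement is the Claim_ definition above) =====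
theorem solution_spec : Claim_equal_solution := by
  intro answers _
  unfold Spec_solution solution solution_alt
  rw [fold_eq_scores]
  simp only [List.map_cons, List.map_nil]
  rw [altScore_eq answers _ (by norm_num), altScore_eq answers _ (by norm_num),
    altScore_eq answers _ (by norm_num)]
  set s1 := scoreOf [1, 2, 3, 4, 5] answers with hs1
  set s2 := scoreOf [2, 1, 2, 3, 2, 4, 2, 5] answers with hs2
  set s3 := scoreOf [3, 3, 1, 1, 2, 2, 4, 4, 5, 5] answers with hs3
  simp only [PySem.List.enumerate_cons, PySem.List.enumerate_nil]
  generalize (PySem.List.max? [s1, s2, s3] (fun y => y)).getD 0 = m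
  exact pick m s1 s2 s3
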